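-- pv_equiv track=rewrite | github.com/fivetran/fivetran_connector_sdk | examples/common_patterns_for_connectors/performance_improvements_with_adaptive_processing/snowflake/connector.py | categorize_and_sort_tables
-- ===== SOURCE A (Python) =====
-- from typing import List, Dict, Any, Tuple, Optional
--
-- SMALL_TABLE_THRESHOLD = 1000000  # 1M rows - small tables get maximum performance
--
-- LARGE_TABLE_THRESHOLD = 10000000  # 10M rows - reduced threshold for stress testing (953K = medium)
--
-- def categorize_and_sort_tables(tables: List[str], table_sizes: Dict[str, int]) -> List[Tuple[str, str, int]]:
--     """
--     Categorize tables by size and sort for optimal processing order.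
--
--     This function categorizes tables into small, medium, and large based on
--     the configured thresholds and sorts them for optimal processing order.
--
--     Returns: List of tuples (table_name, category, row_count)
--     Categories: 'small', 'medium', 'large'
--     """
--     categorized = []
--
--     for table in tables:
--         row_count = table_sizes.get(table, 0)
--
--         if row_count < SMALL_TABLE_THRESHOLD:
--             category = 'small'
--         elif row_count < LARGE_TABLE_THRESHOLD:
--             category = 'medium'
--         else:
--             category = 'large'
--
--         categorized.append((table, category, row_count))
--
--     # Sort by category (small first, then medium, then large) and by row count within each category
--     categorized.sort(key=lambda x: ('small', 'medium', 'large').index(x[1]) * 1000000000 + x[2])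
--
--     return categorized
-- ===== SOURCE B (Python) =====
-- SMALL_TABLE_THRESHOLD = 1000000
-- LARGE_TABLE_THRESHOLD = 10000000
--
-- def categorize_and_sort_tables(tables, table_sizes):
--     small, medium, large = [], [], []
--     for table in tables:
--         rc = table_sizes.get(table, 0)
--         if rc < SMALL_TABLE_THRESHOLD:
--             small.append((table, 'small', rc))
--         elif rc < LARGE_TABLE_THRESHOLD:
--             medium.append((table, 'medium', rc))
--         else:
--             large.append((table, 'large', rc))
--     small.sort(key=lambda x: x[2])
--     medium.sort(key=lambda x: x[2])
--     large.sort(key=lambda x: x[2])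
--     return small + medium + large
-- ===== Notes on version B (the rewrite author's own statement) =====
-- stated objective: simpler
-- what changed: Instead of tagging every row with a composite numeric key (tuple .index times 1e9 plus row count) and sorting the whole list once, B buckets the tables into three lists during the single pass and sorts each bucket by row count alone, returning their concatenation; the composite-key encoding disappears.
import Mathlib
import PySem

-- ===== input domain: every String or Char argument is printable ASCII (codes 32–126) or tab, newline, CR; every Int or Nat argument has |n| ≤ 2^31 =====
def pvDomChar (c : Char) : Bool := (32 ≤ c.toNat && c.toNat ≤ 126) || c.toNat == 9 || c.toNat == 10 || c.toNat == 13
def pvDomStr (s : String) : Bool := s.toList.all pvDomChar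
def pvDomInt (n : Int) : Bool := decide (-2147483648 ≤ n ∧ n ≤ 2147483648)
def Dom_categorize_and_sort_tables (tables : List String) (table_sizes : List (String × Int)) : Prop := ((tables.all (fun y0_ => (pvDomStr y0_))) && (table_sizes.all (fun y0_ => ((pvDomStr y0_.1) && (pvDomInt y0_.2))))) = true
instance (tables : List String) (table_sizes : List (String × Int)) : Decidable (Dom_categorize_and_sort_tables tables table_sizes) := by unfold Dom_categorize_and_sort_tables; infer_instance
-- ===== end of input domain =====

-- B drops A's composite-key trick (tuple .index * 1e9 + row count, one global sort): it buckets
-- rows into small/medium/large during the pass and sorts each bucket by row count alone (simpler).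

-- ===== PORT A =====
def categorize_and_sort_tables (tables : List String) (table_sizes : List (String × Int)) : List (String × String × Int) :=
  let categorized := tables.foldl (fun acc table =>
    let row_count := PySem.Dict.getD ⟨table_sizes⟩ table 0
    let category :=
      if row_count < 1000000 then "small"
      else if row_count < 10000000 then "medium"
      else "large"
    acc ++ [(table, category, row_count)]) []
  -- ('small','medium','large').index(x[1]) always succeeds here; ValueError = none mapped to 0 (unreachable)
  PySem.List.sorted categorized
    (fun x => (((PySem.List.index? ["small", "medium", "large"] x.2.1).getD 0 : Nat) : Int) * 1000000000 + x.2.2)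

-- ===== PORT B =====
def categorize_and_sort_tables_alt (tables : List String) (table_sizes : List (String × Int)) : List (String × String × Int) :=
  let buckets := tables.foldl
    (fun (acc : List (String × String × Int) × List (String × String × Int) × List (String × String × Int)) table =>
      let rc := PySem.Dict.getD ⟨table_sizes⟩ table 0
      if rc < 1000000 then (acc.1 ++ [(table, "small", rc)], acc.2.1, acc.2.2)
      else if rc < 10000000 then (acc.1, acc.2.1 ++ [(table, "medium", rc)], acc.2.2)
      else (acc.1, acc.2.1, acc.2.2 ++ [(table, "large", rc)]))
    ([], [], [])
  PySem.List.sorted buckets.1 (fun x => x.2.2) ++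
  PySem.List.sorted buckets.2.1 (fun x => x.2.2) ++
  PySem.List.sorted buckets.2.2 (fun x => x.2.2)

-- ===== PRECONDITION & SPEC =====
def Spec_categorize_and_sort_tables (tables : List String) (table_sizes : List (String × Int)) (out : List (String × String × Int)) : Prop := out = categorize_and_sort_tables_alt tables table_sizes
instance (tables : List String) (table_sizes : List (String × Int)) (out : List (String × String × Int)) : Decidable (Spec_categorize_and_sort_tables tables table_sizes out) := by unfold Spec_categorize_and_sort_tables; infer_instance

-- ===== CLAIM (what is proved, stated in full; the proofs are below) =====
def Claim_equal_categorize_and_sort_tables : Prop := ∀ (tables : List String) (table_sizes : List (String × Int)), Dom_categorize_and_sort_tables tables table_sizes → Spec_categorize_and_sort_tables tables table_sizes (categorize_and_sort_tables tables table_sizes)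

-- ===== LEMMAS AND PROOFS =====

-- A's composite sort key, named for the proofs
def pvK (x : String × String × Int) : Int :=
  (((PySem.List.index? ["small", "medium", "large"] x.2.1).getD 0 : Nat) : Int) * 1000000000 + x.2.2

-- the row a single table becomes
def pvRow (table_sizes : List (String × Int)) (table : String) : String × String × Int :=
  let rc := PySem.Dict.getD ⟨table_sizes⟩ table 0
  (table, if rc < 1000000 then "small" else if rc < 10000000 then "medium" else "large", rc)

-- rows produced by the pass: category agrees with the row count
def pvShape (x : String × String × Int) : Prop :=
  (x.2.1 = "small" ∧ x.2.2 < 1000000) ∨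
  (x.2.1 = "medium" ∧ 1000000 ≤ x.2.2 ∧ x.2.2 < 10000000) ∨
  (x.2.1 = "large" ∧ 10000000 ≤ x.2.2)

lemma pvK_small {x : String × String × Int} (h : x.2.1 = "small") : pvK x = x.2.2 := by
  unfold pvK
  rw [h, show PySem.List.index? ["small", "medium", "large"] "small" = some 0 from by decide]
  simp
lemma pvK_medium {x : String × String × Int} (h : x.2.1 = "medium") : pvK x = 1000000000 + x.2.2 := by
  unfold pvK
  rw [h, show PySem.List.index? ["small", "medium", "large"] "medium" = some 1 from by decide]
  simp
lemma pvK_large {x : String × String × Int} (h : x.2.1 = "large") : pvK x = 2000000000 + x.2.2 := by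
  unfold pvK
  rw [h, show PySem.List.index? ["small", "medium", "large"] "large" = some 2 from by decide]
  norm_num

lemma shape_row (ts : List (String × Int)) (t : String) : pvShape (pvRow ts t) := by
  simp only [pvShape, pvRow]
  split_ifs with h1 h2 <;> simp <;> omega

lemma insertBy_congr {α : Type} (p q : α → α → Bool) (x : α) (ys : List α)
    (h : ∀ z ∈ ys, p x z = q x z) :
    PySem.List.insertBy p x ys = PySem.List.insertBy q x ys := by
  induction ys with
  | nil => rfl
  | cons y ys ih =>
    have hy := h y (by simp)
    simp only [PySem.List.insertBy, hy]
    split <;> simp [ih (fun z hz => h z (by simp [hz]))]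

lemma insertBy_append_left {α : Type} (before : α → α → Bool) (x : α) (A B : List α)
    (hB : ∀ z ∈ B, before x z = true) :
    PySem.List.insertBy before x (A ++ B) = PySem.List.insertBy before x A ++ B := by
  induction A with
  | nil =>
    cases B with
    | nil => rfl
    | cons b bs => simp [PySem.List.insertBy, hB b (by simp)]
  | cons a as ih =>
    simp only [List.cons_append, PySem.List.insertBy]
    split <;> simp [ih]

lemma insertBy_append_right {α : Type} (before : α → α → Bool) (x : α) (A B : List α)
    (hA : ∀ z ∈ A, before x z = false) :
    PySem.List.insertBy before x (A ++ B) = A ++ PySem.List.insertBy before x B := by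
  induction A with
  | nil => rfl
  | cons a as ih =>
    simp only [List.cons_append, PySem.List.insertBy, hA a (by simp)]
    simp [ih (fun z hz => hA z (by simp [hz]))]

lemma sorted_append_singleton {α κ : Type} [LinearOrder κ] (xs : List α) (x : α) (key : α → κ) :
    PySem.List.sorted (xs ++ [x]) key =
      PySem.List.insertBy (fun a b => decide (key a < key b)) x (PySem.List.sorted xs key) := by
  rw [PySem.List.sorted_eq_foldl_insertBy, PySem.List.sorted_eq_foldl_insertBy, List.foldl_append]
  rfl

-- bucket predicates
def pvPS (x : String × String × Int) : Bool := decide (x.2.2 < 1000000)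
def pvPM (x : String × String × Int) : Bool := decide (1000000 ≤ x.2.2 ∧ x.2.2 < 10000000)
def pvPL (x : String × String × Int) : Bool := decide (10000000 ≤ x.2.2)

-- the heart: a stable sort under A's composite key = sorted small ++ sorted medium ++ sorted large
lemma pv_main (L : List (String × String × Int)) (h : ∀ x ∈ L, pvShape x) :
    PySem.List.sorted L pvK =
      PySem.List.sorted (L.filter pvPS) (fun x => x.2.2) ++
      PySem.List.sorted (L.filter pvPM) (fun x => x.2.2) ++
      PySem.List.sorted (L.filter pvPL) (fun x => x.2.2) := by
  induction L using List.reverseRecOn with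
  | nil => simp [PySem.List.sorted]
  | append_singleton L x ih =>
    have hx : pvShape x := h x (by simp)
    have hL : ∀ y ∈ L, pvShape y := fun y hy => h y (by simp [hy])
    have memS : ∀ z ∈ PySem.List.sorted (L.filter pvPS) (fun x => x.2.2),
        z.2.1 = "small" ∧ z.2.2 < 1000000 := by
      intro z hz
      rw [PySem.List.mem_sorted] at hz
      have hzf := List.of_mem_filter hz
      have hzs := hL z (List.mem_of_mem_filter hz)
      simp only [pvPS, decide_eq_true_eq] at hzf
      rcases hzs with h1 | h2 | h3 <;> first | exact ⟨h1.1, hzf⟩ | omega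
    have memM : ∀ z ∈ PySem.List.sorted (L.filter pvPM) (fun x => x.2.2),
        z.2.1 = "medium" ∧ 1000000 ≤ z.2.2 ∧ z.2.2 < 10000000 := by
      intro z hz
      rw [PySem.List.mem_sorted] at hz
      have hzf := List.of_mem_filter hz
      have hzs := hL z (List.mem_of_mem_filter hz)
      simp only [pvPM, decide_eq_true_eq] at hzf
      rcases hzs with h1 | h2 | h3 <;> first | exact ⟨h2.1, hzf⟩ | omega
    have memG : ∀ z ∈ PySem.List.sorted (L.filter pvPL) (fun x => x.2.2),
        z.2.1 = "large" ∧ 10000000 ≤ z.2.2 := by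
      intro z hz
      rw [PySem.List.mem_sorted] at hz
      have hzf := List.of_mem_filter hz
      have hzs := hL z (List.mem_of_mem_filter hz)
      simp only [pvPL, decide_eq_true_eq] at hzf
      rcases hzs with h1 | h2 | h3 <;> first | exact ⟨h3.1, hzf⟩ | omega
    rw [sorted_append_singleton, ih hL]
    rcases hx with ⟨hc, hr⟩ | ⟨hc, hr1, hr2⟩ | ⟨hc, hr⟩
    · -- x is small
      have hfS : (L ++ [x]).filter pvPS = L.filter pvPS ++ [x] := by
        simp [List.filter_append, pvPS, hr]
      have hfM : (L ++ [x]).filter pvPM = L.filter pvPM := by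
        simp [List.filter_append, pvPM]; omega
      have hfL : (L ++ [x]).filter pvPL = L.filter pvPL := by
        simp [List.filter_append, pvPL]; omega
      rw [hfS, hfM, hfL, sorted_append_singleton, List.append_assoc,
        insertBy_append_left (fun a b => decide (pvK a < pvK b)) x _ _ (by
          intro z hz
          rcases List.mem_append.1 hz with hz | hz
          · have := memM z hz
            simp only [decide_eq_true_eq, pvK_small hc, pvK_medium this.1]
            omega
          · have := memG z hz
            simp only [decide_eq_true_eq, pvK_small hc, pvK_large this.1]
            omega),
        insertBy_congr (fun a b => decide (pvK a < pvK b)) (fun a b => decide (a.2.2 < b.2.2)) x _ (by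
          intro z hz
          have := memS z hz
          simp only [pvK_small hc, pvK_small this.1]),
        ← List.append_assoc]
    · -- x is medium
      have hfS : (L ++ [x]).filter pvPS = L.filter pvPS := by
        simp [List.filter_append, pvPS]; omega
      have hfM : (L ++ [x]).filter pvPM = L.filter pvPM ++ [x] := by
        simp [List.filter_append, pvPM]; omega
      have hfL : (L ++ [x]).filter pvPL = L.filter pvPL := by
        simp [List.filter_append, pvPL]; omega
      rw [hfS, hfM, hfL, sorted_append_singleton,
        insertBy_append_left (fun a b => decide (pvK a < pvK b)) x _ _ (by
          intro z hz
          have := memG z hz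
          simp only [decide_eq_true_eq, pvK_medium hc, pvK_large this.1]
          omega),
        insertBy_append_right (fun a b => decide (pvK a < pvK b)) x _ _ (by
          intro z hz
          have := memS z hz
          simp only [decide_eq_false_iff_not, pvK_medium hc, pvK_small this.1]
          omega),
        insertBy_congr (fun a b => decide (pvK a < pvK b)) (fun a b => decide (a.2.2 < b.2.2)) x _ (by
          intro z hz
          have := memM z hz
          simp only [pvK_medium hc, pvK_medium this.1, decide_eq_decide]
          omega)]
    · -- x is large
      have hfS : (L ++ [x]).filter pvPS = L.filter pvPS := by
        simp [List.filter_append, pvPS]; omega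
      have hfM : (L ++ [x]).filter pvPM = L.filter pvPM := by
        simp [List.filter_append, pvPM]; omega
      have hfL : (L ++ [x]).filter pvPL = L.filter pvPL ++ [x] := by
        simp [List.filter_append, pvPL, hr]
      rw [hfS, hfM, hfL, sorted_append_singleton,
        insertBy_append_right (fun a b => decide (pvK a < pvK b)) x _ _ (by
          intro z hz
          rcases List.mem_append.1 hz with hz | hz
          · have := memS z hz
            simp only [decide_eq_false_iff_not, pvK_large hc, pvK_small this.1]
            omega
          · have := memM z hz
            simp only [decide_eq_false_iff_not, pvK_large hc, pvK_medium this.1]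
            omega),
        insertBy_congr (fun a b => decide (pvK a < pvK b)) (fun a b => decide (a.2.2 < b.2.2)) x _ (by
          intro z hz
          have := memG z hz
          simp only [pvK_large hc, pvK_large this.1, decide_eq_decide]
          omega)]

-- A's loop is a map
lemma pvA_eq (tables : List String) (ts : List (String × Int)) :
    categorize_and_sort_tables tables ts = PySem.List.sorted (tables.map (pvRow ts)) pvK := by
  unfold categorize_and_sort_tables
  rw [PySem.List.foldl_append_singleton_eq_map]
  rfl

-- B's loop fills the three buckets with the three filters of the same map
lemma pvB_fold (ts : List (String × Int)) (tables : List String)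
    (s0 m0 l0 : List (String × String × Int)) :
    tables.foldl
      (fun (acc : List (String × String × Int) × List (String × String × Int) × List (String × String × Int)) table =>
        let rc := PySem.Dict.getD ⟨ts⟩ table 0
        if rc < 1000000 then (acc.1 ++ [(table, "small", rc)], acc.2.1, acc.2.2)
        else if rc < 10000000 then (acc.1, acc.2.1 ++ [(table, "medium", rc)], acc.2.2)
        else (acc.1, acc.2.1, acc.2.2 ++ [(table, "large", rc)]))
      (s0, m0, l0) =
    (s0 ++ (tables.map (pvRow ts)).filter pvPS,
     m0 ++ (tables.map (pvRow ts)).filter pvPM,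
     l0 ++ (tables.map (pvRow ts)).filter pvPL) := by
  induction tables generalizing s0 m0 l0 with
  | nil => simp
  | cons t rest ih =>
    simp only [List.foldl_cons, List.map_cons, List.filter_cons]
    by_cases h1 : PySem.Dict.getD ⟨ts⟩ t 0 < 1000000
    · have hrow : pvRow ts t = (t, "small", PySem.Dict.getD ⟨ts⟩ t 0) := by simp [pvRow, h1]
      simp only [h1, if_pos, hrow, ih]
      simp [pvPS, pvPM, pvPL, h1]
      omega
    · by_cases h2 : PySem.Dict.getD ⟨ts⟩ t 0 < 10000000
      · have hrow : pvRow ts t = (t, "medium", PySem.Dict.getD ⟨ts⟩ t 0) := by simp [pvRow, h1, h2]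
        simp only [h1, h2, if_pos, hrow, ih]
        simp [pvPS, pvPM, pvPL, h1, h2]
      · have hrow : pvRow ts t = (t, "large", PySem.Dict.getD ⟨ts⟩ t 0) := by simp [pvRow, h1, h2]
        simp only [h1, h2, hrow, ih]
        simp [pvPS, pvPM, pvPL, h1, h2]

-- ===== VERDICT (by name: the statement is the Claim_ definition above) =====
theorem categorize_and_sort_tables_spec : Claim_equal_categorize_and_sort_tables := by
  intro tables ts _
  unfold Spec_categorize_and_sort_tables
  rw [pvA_eq]
  unfold categorize_and_sort_tables_alt
  rw [pvB_fold]
  simp only [List.nil_append]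
  exact pv_main _ (by
    intro x hx
    rcases List.mem_map.1 hx with ⟨t, _, ht⟩
    exact ht ▸ shape_row ts t)
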